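-- pv_equiv track=rewrite | github.com/redcar1995/shopify-grpc | tools/mkowners/mkowners.py | glob_intersect
-- ===== SOURCE A (Python) =====
-- def glob_intersect(g1, g2):
--   if not g2:
--     return all(c == '*' for c in g1)
--   if not g1:
--     return all(c == '*' for c in g2)
--   c1, *t1 = g1
--   c2, *t2 = g2
--   if c1 == '*':
--     return glob_intersect(g1, t2) or glob_intersect(t1, g2)
--   if c2 == '*':
--     return glob_intersect(t1, g2) or glob_intersect(g1, t2)
--   return c1 == c2 and glob_intersect(t1, t2)
-- ===== SOURCE B (Python) =====
-- def glob_intersect(g1, g2):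
--     # fast path: consume the star-free common prefix; a mismatch there decides immediately
--     i = 0
--     n, m = len(g1), len(g2)
--     while i < n and i < m and g1[i] != '*' and g2[i] != '*':
--         if g1[i] != g2[i]:
--             return False
--         i += 1
--     g1, g2 = g1[i:], g2[i:]
--     n, m = len(g1), len(g2)
--     # row[j] = "do g1[i:] and g2[j:] intersect", computed bottom-up (i = n .. 0)
--     row = [True] * (m + 1)
--     for j in range(m - 1, -1, -1):
--         row[j] = row[j + 1] and g2[j] == '*'
--     for i in range(n - 1, -1, -1):
--         new = [False] * (m + 1)
--         new[m] = row[m] and g1[i] == '*'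
--         for j in range(m - 1, -1, -1):
--             c1, c2 = g1[i], g2[j]
--             if c1 == '*' or c2 == '*':
--                 new[j] = new[j + 1] or row[j]
--             else:
--                 new[j] = c1 == c2 and row[j + 1]
--         row = new
--     return row[0]
-- ===== Notes on version B (the rewrite author's own statement) =====
-- stated objective: faster
-- what changed: Replaced A's exponential branching recursion by a two-pointer scan that consumes the star-free common prefix followed by a bottom-up dynamic program over suffix-position pairs, keeping one row of the table at a time.
import Mathlib
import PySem

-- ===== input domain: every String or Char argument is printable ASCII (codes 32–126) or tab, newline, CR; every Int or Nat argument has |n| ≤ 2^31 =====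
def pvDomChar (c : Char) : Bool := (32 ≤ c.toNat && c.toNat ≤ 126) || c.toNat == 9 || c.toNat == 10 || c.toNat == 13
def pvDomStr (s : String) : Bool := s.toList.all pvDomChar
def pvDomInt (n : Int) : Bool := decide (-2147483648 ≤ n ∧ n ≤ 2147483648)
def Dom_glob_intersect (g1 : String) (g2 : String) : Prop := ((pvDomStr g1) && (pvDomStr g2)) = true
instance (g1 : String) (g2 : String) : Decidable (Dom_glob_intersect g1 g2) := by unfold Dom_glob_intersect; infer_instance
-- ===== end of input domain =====

-- B replaces A's exponential branching recursion by a star-free common-prefix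
-- two-pointer scan followed by a bottom-up dynamic program over suffix-position pairs
-- (same return value; objective: asymptotically faster).

-- ===== PORT A =====
-- literal transliteration of A's recursion on the character lists
def globA : List Char → List Char → Bool
  | g1, [] => g1.all (· == '*')
  | [], g2 => g2.all (· == '*')
  | c1 :: t1, c2 :: t2 =>
    if c1 == '*' then globA (c1 :: t1) t2 || globA t1 (c2 :: t2)
    else if c2 == '*' then globA t1 (c2 :: t2) || globA (c1 :: t1) t2
    else c1 == c2 && globA t1 t2
termination_by g1 g2 => g1.length + g2.length
decreasing_by all_goals (simp only [List.length_cons]; omega)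

def glob_intersect (g1 : String) (g2 : String) : Bool :=
  globA g1.toList g2.toList

-- ===== PORT B =====
-- base row: row[j] = (g1 exhausted) vs suffix g2[j:], built back-to-front (Source B's first loop)
def baseRow : List Char → List Bool
  | [] => [true]
  | c :: t =>
    let r := baseRow t
    (r.headD false && c == '*') :: r

-- one outer-loop step of Source B: from row for g1[i+1:] to the row for g1[i:], inner loop j downward
def stepRow (c1 : Char) : List Char → List Bool → List Bool
  | [], row => [row.headD false && c1 == '*']
  | c2 :: t2, row =>
    let rest := stepRow c1 t2 row.tail
    let v :=
      if c1 == '*' || c2 == '*' then rest.headD false || row.headD false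
      else c1 == c2 && row.tail.headD false
    v :: rest

-- the DP itself (Source B's two row loops)
def dpB (l1 l2 : List Char) : Bool :=
  (l1.foldr (fun c row => stepRow c l2 row) (baseRow l2)).headD false

-- Source B's fast-path while loop: consume the star-free common prefix, then run the DP
def globB : List Char → List Char → Bool
  | c1 :: t1, c2 :: t2 =>
    if c1 == '*' || c2 == '*' then dpB (c1 :: t1) (c2 :: t2)
    else if c1 == c2 then globB t1 t2
    else false
  | l1, l2 => dpB l1 l2

def glob_intersect_alt (g1 : String) (g2 : String) : Bool :=
  globB g1.toList g2.toList

-- ===== PRECONDITION & SPEC =====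
def Spec_glob_intersect (g1 : String) (g2 : String) (out : Bool) : Prop := out = glob_intersect_alt g1 g2
instance (g1 : String) (g2 : String) (out : Bool) : Decidable (Spec_glob_intersect g1 g2 out) := by unfold Spec_glob_intersect; infer_instance

-- ===== CLAIM (what is proved, stated in full; the proofs are below) =====
def Claim_equal_glob_intersect : Prop := ∀ (g1 : String) (g2 : String), Dom_glob_intersect g1 g2 → Spec_glob_intersect g1 g2 (glob_intersect g1 g2)

-- ===== LEMMAS AND PROOFS =====

-- head of the tails-indexed row is the value at the full suffix
theorem headD_tails_map {f : List Char → Bool} (l : List Char) :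
    ((l.tails.map f).headD false) = f l := by
  cases l <;> simp

-- the base row is exactly A's value on the empty first pattern against every suffix of l2
theorem baseRow_spec (l2 : List Char) :
    baseRow l2 = l2.tails.map (fun s => globA [] s) := by
  induction l2 with
  | nil => simp [baseRow, globA]
  | cons c t ih =>
    simp only [baseRow, ih, List.tails_cons, List.map_cons, headD_tails_map]
    congr 1
    cases t with
    | nil => simp [globA, Bool.and_comm]
    | cons d u => simp [globA, Bool.and_comm]

-- one step of Source B's outer loop maps the row for l1' to the row for c1 :: l1'
theorem stepRow_spec (c1 : Char) (l1' : List Char) (l2 : List Char) :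
    stepRow c1 l2 (l2.tails.map (fun s => globA l1' s)) =
      l2.tails.map (fun s => globA (c1 :: l1') s) := by
  induction l2 with
  | nil =>
    simp [stepRow, List.tails]
    cases l1' with
    | nil => simp [globA, Bool.and_comm]
    | cons d u => simp [globA, Bool.and_comm]
  | cons c2 t2 ih =>
    simp only [List.tails_cons, List.map_cons, stepRow, List.tail_cons, ih,
      List.headD_cons, headD_tails_map]
    congr 1
    by_cases h1 : c1 == '*'
    · simp [globA, h1]
    · by_cases h2 : c2 == '*'
      · simp [globA, h1, h2, Bool.or_comm]
      · simp [globA, h1, h2]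

-- the whole fold produces the row of A-values for l1 against every suffix of l2
theorem foldr_spec (l1 l2 : List Char) :
    l1.foldr (fun c row => stepRow c l2 row) (baseRow l2) =
      l2.tails.map (fun s => globA l1 s) := by
  induction l1 with
  | nil => simpa using baseRow_spec l2
  | cons c t ih => simp [List.foldr_cons, ih, stepRow_spec]

theorem dpB_eq (l1 l2 : List Char) : dpB l1 l2 = globA l1 l2 := by
  unfold dpB
  rw [foldr_spec, headD_tails_map]

theorem globB_eq (l1 l2 : List Char) : globB l1 l2 = globA l1 l2 := by
  induction l1 generalizing l2 with
  | nil => simp [globB, dpB_eq]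
  | cons c1 t1 ih =>
    cases l2 with
    | nil => simp [globB, dpB_eq]
    | cons c2 t2 =>
      simp only [globB]
      by_cases hs : (c1 == '*' || c2 == '*') = true
      · simp [hs, dpB_eq]
      · rw [Bool.or_eq_true] at hs
        obtain ⟨h1, h2⟩ : c1 ≠ '*' ∧ c2 ≠ '*' := by
          constructor <;> intro h <;> exact hs (by simp [h])
        rw [if_neg (by simp [h1, h2])]
        by_cases he : c1 = c2
        · subst he
          simp [globA, h1, ih]
        · simp [globA, h1, h2, he]

-- ===== VERDICT (by name: the statement is the Claim_ definition above) =====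
theorem glob_intersect_spec : Claim_equal_glob_intersect := by
  intro g1 g2 _
  unfold Spec_glob_intersect glob_intersect glob_intersect_alt
  exact (globB_eq _ _).symm
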